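-- pv_equiv track=rewrite | github.com/gotlougit/python-lab-assignments | assignment7/5.py | is_circularly_identical
-- ===== SOURCE A (Python) =====
-- def is_circularly_identical(list1, list2):
--     if len(list1) != len(list2):
--         return False
--
--     # Concatenate list1 with itself
--     concatenated = list1 + list1
--
--     # Check if list2 is a sublist of the concatenated list
--     for i in range(len(concatenated) - len(list2) + 1):
--         if concatenated[i:i+len(list2)] == list2:
--             return True
--
--     return False
-- ===== SOURCE B (Python) =====
-- def is_circularly_identical(list1, list2):
--     if len(list1) != len(list2):
--         return False
--     if not list1:
--         return True
--     rot = list1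
--     for _ in range(len(list1)):
--         if rot == list2:
--             return True
--         rot = rot[1:] + rot[:1]
--     return False
-- ===== Notes on version B (the rewrite author's own statement) =====
-- stated objective: alternative
-- what changed: B never builds the doubled list or slices windows out of it; it maintains the current rotation as loop state, advancing it one step per iteration and comparing it to list2 directly.
import Mathlib
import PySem

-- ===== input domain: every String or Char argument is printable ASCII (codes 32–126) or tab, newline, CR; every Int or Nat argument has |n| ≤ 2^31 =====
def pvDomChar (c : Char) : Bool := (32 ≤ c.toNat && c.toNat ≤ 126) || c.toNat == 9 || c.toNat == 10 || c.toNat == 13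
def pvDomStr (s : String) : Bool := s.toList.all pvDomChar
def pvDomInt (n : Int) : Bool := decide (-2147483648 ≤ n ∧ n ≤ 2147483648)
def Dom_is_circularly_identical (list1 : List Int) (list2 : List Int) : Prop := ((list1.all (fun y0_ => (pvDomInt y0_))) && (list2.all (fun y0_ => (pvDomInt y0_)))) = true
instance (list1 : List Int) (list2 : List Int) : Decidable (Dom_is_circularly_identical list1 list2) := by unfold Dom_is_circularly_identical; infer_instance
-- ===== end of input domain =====

-- B replaces A's window scan over the doubled list by an incremental rotation kept as
-- loop state (objective: alternative, same asymptotic cost).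

-- ===== PORT A =====
-- for i in range(len(concatenated) - len(list2) + 1): if concatenated[i:i+len(list2)] == list2: return True
def is_circularly_identical (list1 : List Int) (list2 : List Int) : Bool :=
  if list1.length ≠ list2.length then false
  else
    let concatenated := list1 ++ list1
    (PySem.List.pyRange 0 ((concatenated.length : Int) - (list2.length : Int) + 1) 1).any
      (fun i => PySem.List.slice concatenated (some i) (some (i + (list2.length : Int))) == list2)

-- ===== PORT B =====
-- rot = rot[1:] + rot[:1], one comparison per step, len(list1) steps
def altLoop (list2 : List Int) : Nat → List Int → Bool
  | 0, _ => false
  | k + 1, rot => if rot == list2 then true else altLoop list2 k (rot.drop 1 ++ rot.take 1)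

def is_circularly_identical_alt (list1 : List Int) (list2 : List Int) : Bool :=
  if list1.length ≠ list2.length then false
  else if list1 = [] then true
  else altLoop list2 list1.length list1

-- ===== PRECONDITION & SPEC =====
def Spec_is_circularly_identical (list1 : List Int) (list2 : List Int) (out : Bool) : Prop := out = is_circularly_identical_alt list1 list2
instance (list1 : List Int) (list2 : List Int) (out : Bool) : Decidable (Spec_is_circularly_identical list1 list2 out) := by unfold Spec_is_circularly_identical; infer_instance

-- ===== CLAIM (what is proved, stated in full; the proofs are below) =====
def Claim_equal_is_circularly_identical : Prop := ∀ (list1 : List Int) (list2 : List Int), Dom_is_circularly_identical list1 list2 → Spec_is_circularly_identical list1 list2 (is_circularly_identical list1 list2)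

-- ===== LEMMAS AND PROOFS =====

-- A window of the doubled list is a rotation.
theorem window_eq_rotate (l : List Int) (k : Nat) (hk : k ≤ l.length) :
    ((l ++ l).drop k).take l.length = l.rotate k := by
  rw [List.rotate_eq_drop_append_take hk, List.drop_append_of_le_length hk]
  have hlen : (l.drop k).length = l.length - k := List.length_drop ..
  rw [show l.length = (l.drop k).length + k by omega, List.take_append]
  simp

-- characterisation of A's loop
theorem portA_iff (l1 l2 : List Int) (h : l1.length = l2.length) :
    is_circularly_identical l1 l2 = true ↔ ∃ k ≤ l1.length, l1.rotate k = l2 := by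
  unfold is_circularly_identical
  simp only [h, if_neg (by omega : ¬ l2.length ≠ l2.length)]
  rw [show ((((l1 ++ l1).length : Int)) - (l2.length : Int) + 1) = ((l1.length + 1 : Nat) : Int) by
    simp only [List.length_append]; push_cast; omega]
  rw [PySem.List.pyRange_one]
  simp only [List.any_map, List.any_eq_true, List.mem_range, Function.comp]
  constructor
  · rintro ⟨k, hk, hEq⟩
    refine ⟨k, by omega, ?_⟩
    have hk' : k ≤ l1.length := by omega
    rw [show ((0 : Int) + (k : Nat)) = ((k : Nat) : Int) by ring] at hEq
    rw [PySem.List.slice_natCast_add, ← h, window_eq_rotate l1 k (by omega : k ≤ l1.length)] at hEq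
    exact beq_iff_eq.mp hEq
  · rintro ⟨k, hk, hEq⟩
    refine ⟨k, by omega, ?_⟩
    rw [show ((0 : Int) + (k : Nat)) = ((k : Nat) : Int) by ring]
    rw [PySem.List.slice_natCast_add, ← h, window_eq_rotate l1 k (by omega : k ≤ l1.length)]
    exact beq_iff_eq.mpr hEq

-- characterisation of B's loop
theorem altLoop_iff (l2 : List Int) (k : Nat) (r : List Int) (hr : r ≠ []) :
    altLoop l2 k r = true ↔ ∃ j < k, r.rotate j = l2 := by
  induction k generalizing r with
  | zero => simp [altLoop]
  | succ k ih =>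
    have hrot1 : r.drop 1 ++ r.take 1 = r.rotate 1 :=
      (List.rotate_eq_drop_append_take (by
        cases r with
        | nil => exact absurd rfl hr
        | cons a t => simp)).symm
    have hne : r.rotate 1 ≠ [] := by
      intro hc
      apply hr
      have := congrArg List.length hc
      simp at this
      exact this
    unfold altLoop
    by_cases hcase : r = l2
    · simp [hcase]
      exact ⟨0, by omega, by simp⟩
    · rw [if_neg (by simpa using hcase), hrot1, ih _ hne]
      constructor
      · rintro ⟨j, hj, hEq⟩
        rw [List.rotate_rotate] at hEq
        exact ⟨1 + j, by omega, hEq⟩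
      · rintro ⟨j, hj, hEq⟩
        cases j with
        | zero => exact absurd (by simpa using hEq) hcase
        | succ j =>
          refine ⟨j, by omega, ?_⟩
          rw [List.rotate_rotate, show 1 + j = j + 1 by ring]
          exact hEq

theorem main_eq (l1 l2 : List Int) :
    is_circularly_identical l1 l2 = is_circularly_identical_alt l1 l2 := by
  by_cases h : l1.length = l2.length
  · by_cases hnil : l1 = []
    · subst hnil
      have h2 : l2 = [] := by
        cases l2 with
        | nil => rfl
        | cons a t => simp at h
      subst h2
      decide
    · have hA := portA_iff l1 l2 h
      unfold is_circularly_identical_alt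
      rw [if_neg (by omega : ¬ l1.length ≠ l2.length), if_neg hnil]
      have hB := altLoop_iff l2 l1.length l1 hnil
      have hpos : 0 < l1.length := List.length_pos_of_ne_nil hnil
      cases hAval : is_circularly_identical l1 l2 with
      | true =>
        obtain ⟨k, hk, hEq⟩ := hA.mp hAval
        rcases Nat.lt_or_ge k l1.length with hlt | hge
        · exact (hB.mpr ⟨k, hlt, hEq⟩).symm
        · have hkn : k = l1.length := by omega
          subst hkn
          rw [List.rotate_length] at hEq
          exact (hB.mpr ⟨0, hpos, by simpa using hEq⟩).symm
      | false =>
        cases hBval : altLoop l2 l1.length l1 with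
        | false => rfl
        | true =>
          obtain ⟨j, hj, hEq⟩ := hB.mp hBval
          have : is_circularly_identical l1 l2 = true := hA.mpr ⟨j, by omega, hEq⟩
          rw [hAval] at this
          exact this
  · unfold is_circularly_identical is_circularly_identical_alt
    rw [if_pos h, if_pos h]

-- ===== VERDICT (by name: the statement is the Claim_ definition above) =====
theorem is_circularly_identical_spec : Claim_equal_is_circularly_identical := by
  intro l1 l2 _
  unfold Spec_is_circularly_identical
  exact main_eq l1 l2
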